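-- pv_equiv track=rewrite | github.com/vinesnts/reconhecimento-padroes-2021.1 | semana-3/questao_3.py | falso_positivo
-- ===== SOURCE A (Python) =====
-- def falso_positivo(matriz_confusao, classe):
--     fp = 0
--     for key1 in matriz_confusao:
--         if key1 != classe:
--             for key2 in matriz_confusao[key1]:
--                 if key2 == classe:
--                     fp += matriz_confusao[key1][key2]
--     return fp
-- ===== SOURCE B (Python) =====
-- def falso_positivo(matriz_confusao, classe):
--     # Build a transposed (column-indexed) view of the matrix, then read one column.
--     colunas = {}
--     for linha, valores in matriz_confusao.items():
--         for coluna, v in valores.items():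
--             colunas.setdefault(coluna, []).append((linha, v))
--     return sum(v for linha, v in colunas.get(classe, []) if linha != classe)
-- ===== Notes on version B (the rewrite author's own statement) =====
-- stated objective: alternative
-- what changed: B first transposes the whole matrix into a column-indexed grouping (colunas[coluna] = list of (linha, valor) cells), then sums the single 'classe' column excluding its diagonal row, instead of A's row-major nested scan with a per-row exclusion branch.
import Mathlib
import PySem

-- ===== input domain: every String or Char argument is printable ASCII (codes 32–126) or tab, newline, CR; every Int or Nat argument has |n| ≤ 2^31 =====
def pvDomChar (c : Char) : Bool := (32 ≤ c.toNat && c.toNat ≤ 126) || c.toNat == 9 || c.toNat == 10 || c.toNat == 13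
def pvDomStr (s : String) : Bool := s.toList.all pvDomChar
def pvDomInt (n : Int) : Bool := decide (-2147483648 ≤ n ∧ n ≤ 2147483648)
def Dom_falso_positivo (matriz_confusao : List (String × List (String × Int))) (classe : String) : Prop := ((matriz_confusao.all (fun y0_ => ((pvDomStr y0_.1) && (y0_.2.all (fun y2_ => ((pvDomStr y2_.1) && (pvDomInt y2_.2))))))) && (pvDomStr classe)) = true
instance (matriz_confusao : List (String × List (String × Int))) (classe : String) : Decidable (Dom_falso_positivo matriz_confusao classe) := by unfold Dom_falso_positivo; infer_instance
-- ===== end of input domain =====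

-- B transposes the matrix into a column-indexed grouping and then sums the one
-- requested column excluding its diagonal row (objective: alternative algorithm).

-- ===== PORT A =====
-- 'for key1 in matriz_confusao' iterates the dict's keys; 'matriz_confusao[key1]' is dict
-- subscript (never raises here: key1 comes from the key list), ported as Dict lookup.
def falso_positivo (matriz_confusao : List (String × List (String × Int))) (classe : String) : Int :=
  (PySem.Dict.mk matriz_confusao).keys.foldl
    (fun fp key1 =>
      if key1 ≠ classe then
        (PySem.Dict.mk ((PySem.Dict.mk matriz_confusao).getD key1 [])).keys.foldl
          (fun fp key2 =>
            if key2 = classe then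
              fp + (PySem.Dict.mk ((PySem.Dict.mk matriz_confusao).getD key1 [])).getD key2 0
            else fp)
          fp
      else fp)
    0

-- ===== PORT B =====
-- 'colunas.setdefault(coluna, []).append((linha, v))' is Dict.modify coluna [] (· ++ [(linha, v)]).
def falso_positivo_alt (matriz_confusao : List (String × List (String × Int))) (classe : String) : Int :=
  let colunas : PySem.Dict String (List (String × Int)) :=
    (PySem.Dict.mk matriz_confusao).items.foldl
      (fun d p =>
        (PySem.Dict.mk p.2).items.foldl
          (fun d q => d.modify q.1 [] (fun l => l ++ [(p.1, q.2)])) d)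
      PySem.Dict.empty
  (((colunas.getD classe []).filter (fun lv => lv.1 ≠ classe)).map Prod.snd).sum

-- ===== PRECONDITION & SPEC =====
-- Pre_ excludes association lists with duplicate outer or inner keys: such lists do not encode
-- any Python dict (a dict cannot hold duplicate keys), so Python A never receives them.
def Pre_falso_positivo (matriz_confusao : List (String × List (String × Int))) (classe : String) : Prop :=
  (matriz_confusao.map Prod.fst).Nodup ∧ ∀ p ∈ matriz_confusao, (p.2.map Prod.fst).Nodup

instance (matriz_confusao : List (String × List (String × Int))) (classe : String) : Decidable (Pre_falso_positivo matriz_confusao classe) := by unfold Pre_falso_positivo; infer_instance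

def pvWitness_falso_positivo : (List (String × List (String × Int))) × String :=
  ([("a", [("a", 1), ("b", 2)]), ("b", [("a", 3)])], "a")

def Spec_falso_positivo (matriz_confusao : List (String × List (String × Int))) (classe : String) (out : Int) : Prop := out = falso_positivo_alt matriz_confusao classe
instance (matriz_confusao : List (String × List (String × Int))) (classe : String) (out : Int) : Decidable (Spec_falso_positivo matriz_confusao classe out) := by unfold Spec_falso_positivo; infer_instance

-- ===== CLAIM (what is proved, stated in full; the proofs are below) =====
def Claim_equal_falso_positivo : Prop := ∀ (matriz_confusao : List (String × List (String × Int))) (classe : String), Dom_falso_positivo matriz_confusao classe → Pre_falso_positivo matriz_confusao classe → Spec_falso_positivo matriz_confusao classe (falso_positivo matriz_confusao classe)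

-- ===== LEMMAS AND PROOFS =====

-- Summing a concatenation of groups is summing each group (no Mathlib lemma by this shape).
lemma sum_flatMap {α : Type} (l : List α) (g : α → List Int) :
    (l.flatMap g).sum = (l.map (fun x => (g x).sum)).sum := by
  induction l with
  | nil => simp
  | cons a t ih => simp [ih]

-- Summing 'the value at classe, else 0' over a duplicate-free key list picks out one cell.
lemma sum_map_ite_nodup (l : List String) (classe : String) (G : String → Int) (hl : l.Nodup) :
    (l.map (fun k => if k = classe then G k else 0)).sum
      = if classe ∈ l then G classe else 0 := by
  induction l with
  | nil => simp
  | cons a t ih =>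
    simp only [List.nodup_cons] at hl
    simp only [List.map_cons, List.sum_cons, ih hl.2, List.mem_cons]
    by_cases h : a = classe
    · subst h
      simp [hl.1]
    · simp [h, Ne.symm h]

-- The classe-cells of a duplicate-free row, summed, are the row's classe entry (0 if absent).
lemma filter_row_sum (row : List (String × Int)) (classe : String)
    (h : (row.map Prod.fst).Nodup) :
    ((row.filter (fun q => q.1 == classe)).map Prod.snd).sum
      = (PySem.Dict.mk row).getD classe 0 := by
  induction row with
  | nil => simp [PySem.Dict.getD_eq_get?_getD, PySem.Dict.get?]
  | cons a t ih =>
    simp only [List.map_cons, List.nodup_cons] at h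
    by_cases hac : a.1 = classe
    · have ht : t.filter (fun q => q.1 == classe) = [] := by
        apply List.filter_eq_nil_iff.mpr
        intro q hq hq'
        exact h.1 (by subst hac; rw [← (by simpa using hq' : q.1 = a.1)]; exact List.mem_map_of_mem hq)
      have htsum : ((t.filter (fun q => q.1 == classe)).map Prod.snd).sum = 0 := by
        rw [ht]; simp
      rw [List.filter_cons_of_pos (by simpa using hac)]
      simp only [List.map_cons, List.sum_cons, htsum]
      rw [PySem.Dict.getD_eq_get?_getD, PySem.Dict.get?_mk_cons]
      simp [hac]
    · rw [List.filter_cons_of_neg (by simpa using hac)]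
      rw [ih h.2, PySem.Dict.getD_eq_get?_getD, PySem.Dict.getD_eq_get?_getD,
        PySem.Dict.get?_mk_cons]
      simp [hac]

-- The transposing double loop, read at column classe, lists that column's cells row-major.
lemma transpose_col (m : List (String × List (String × Int))) (classe : String)
    (d : PySem.Dict String (List (String × Int))) :
    (m.foldl
      (fun d p =>
        (PySem.Dict.mk p.2).items.foldl
          (fun d q => d.modify q.1 [] (fun l => l ++ [(p.1, q.2)])) d)
      d).getD classe []
    = d.getD classe []
      ++ m.flatMap (fun p => (p.2.filter (fun q => q.1 == classe)).map (fun q => (p.1, q.2))) := by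
  induction m generalizing d with
  | nil => simp
  | cons p t ih =>
    simp only [List.foldl_cons, List.flatMap_cons]
    rw [ih]
    have hone : ((PySem.Dict.mk p.2).items.foldl
          (fun d q => d.modify q.1 [] (fun l => l ++ [(p.1, q.2)])) d).getD classe []
        = d.getD classe [] ++ (p.2.filter (fun q => q.1 == classe)).map (fun q => (p.1, q.2)) := by
      have : (PySem.Dict.mk p.2).items.foldl
            (fun d q => d.modify q.1 [] (fun l => l ++ [(p.1, q.2)])) d
          = ((PySem.Dict.mk p.2).items.map (fun q => (q.1, (p.1, q.2)))).foldl
            (fun d r => d.modify r.1 [] (fun l => l ++ [r.2])) d := by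
        rw [List.foldl_map]
      rw [this, PySem.Dict.getD_foldl_modify_append]
      rw [List.filter_map, List.map_map]
      rfl
    rw [hone, List.append_assoc]

-- ===== shared closed form: both ports equal the filtered column sum =====

lemma alt_eq_sum (m : List (String × List (String × Int))) (classe : String)
    (hin : ∀ p ∈ m, (p.2.map Prod.fst).Nodup) :
    falso_positivo_alt m classe
      = (m.map (fun p => if p.1 ≠ classe then (PySem.Dict.mk p.2).getD classe 0 else 0)).sum := by
  unfold falso_positivo_alt
  simp only [PySem.Dict.items]
  rw [transpose_col]
  simp only [PySem.Dict.getD_empty, List.nil_append]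
  rw [List.filter_flatMap, List.map_flatMap, sum_flatMap]
  apply congrArg
  apply List.map_congr_left
  intro p hp
  by_cases hpc : p.1 = classe
  · have : ((p.2.filter (fun q => q.1 == classe)).map (fun q => (p.1, q.2))).filter
        (fun lv => lv.1 ≠ classe) = [] := by
      apply List.filter_eq_nil_iff.mpr
      intro lv hlv
      obtain ⟨q, _, rfl⟩ := List.mem_map.mp hlv
      simp [hpc]
    rw [this]
    simp [hpc]
  · have : ((p.2.filter (fun q => q.1 == classe)).map (fun q => (p.1, q.2))).filter
        (fun lv => lv.1 ≠ classe)
        = (p.2.filter (fun q => q.1 == classe)).map (fun q => (p.1, q.2)) := by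
      apply List.filter_eq_self.mpr
      intro lv hlv
      obtain ⟨q, _, rfl⟩ := List.mem_map.mp hlv
      simp [hpc]
    rw [this]
    rw [if_pos hpc, List.map_map]
    rw [← filter_row_sum p.2 classe (hin p hp)]
    rfl

-- A's inner loop over a duplicate-free row adds exactly the row's classe cell (0 if absent).
lemma inner_loop (row : List (String × Int)) (classe : String) (fp : Int)
    (h : (row.map Prod.fst).Nodup) :
    (PySem.Dict.mk row).keys.foldl
      (fun fp key2 => if key2 = classe then fp + (PySem.Dict.mk row).getD key2 0 else fp) fp
    = fp + (PySem.Dict.mk row).getD classe 0 := by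
  rw [PySem.List.foldl_congr_mem _ _
      (fun acc k2 => acc + (if k2 = classe then (PySem.Dict.mk row).getD k2 0 else 0)) fp
      (by intro acc x _; by_cases hxc : x = classe <;> simp [hxc])]
  rw [PySem.List.foldl_add]
  rw [sum_map_ite_nodup _ _ _ (by simpa [PySem.Dict.keys_mk] using h)]
  by_cases hc : classe ∈ (PySem.Dict.mk row).keys
  · rw [if_pos hc]
  · rw [if_neg hc,
      PySem.Dict.getD_of_not_contains _ _ (by
        rw [PySem.Dict.contains_eq_decide_mem_keys]; simpa using hc)]

lemma a_eq_sum (m : List (String × List (String × Int))) (classe : String)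
    (hout : (m.map Prod.fst).Nodup) (hin : ∀ p ∈ m, (p.2.map Prod.fst).Nodup) :
    falso_positivo m classe
      = (m.map (fun p => if p.1 ≠ classe then (PySem.Dict.mk p.2).getD classe 0 else 0)).sum := by
  have hkeys : (PySem.Dict.mk m).keys.Nodup := by simpa [PySem.Dict.keys_mk] using hout
  have hrow : ∀ p ∈ m, (PySem.Dict.mk m).getD p.1 [] = p.2 := by
    intro p hp
    exact PySem.Dict.getD_of_mem_items _ (by simpa using hp) hkeys []
  unfold falso_positivo
  rw [PySem.List.foldl_congr_mem _ _
      (fun acc k1 => acc + (if k1 ≠ classe then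
        (PySem.Dict.mk ((PySem.Dict.mk m).getD k1 [])).getD classe 0 else 0)) 0
      (by
        intro acc x hx
        by_cases hxc : x = classe
        · simp [hxc]
        · simp only [hxc, if_pos, ne_eq, not_false_iff]
          rw [inner_loop]
          obtain ⟨p, hp, rfl⟩ : ∃ p ∈ m, p.1 = x := by
            simpa [PySem.Dict.keys_mk] using hx
          rw [hrow p hp]; exact hin p hp)]
  rw [PySem.List.foldl_add]
  simp only [PySem.Dict.keys_mk, List.map_map, Int.zero_add]
  apply congrArg
  apply List.map_congr_left
  intro p hp
  simp only [Function.comp_apply, hrow p hp]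

-- ===== VERDICT (by name: the statement is the Claim_ definition above) =====
theorem falso_positivo_spec : Claim_equal_falso_positivo := by
  intro m classe _ hpre
  unfold Spec_falso_positivo
  rw [a_eq_sum m classe hpre.1 hpre.2, alt_eq_sum m classe hpre.2]
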